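-- pv_equiv track=rewrite | github.com/Deltares/imod-python | imod/idf.py | _has_dim
-- ===== SOURCE A (Python) =====
-- def _has_dim(seq):
--     """Check if either 0 or all None are present
--
--     Returns
--     -------
--     True if no None in seq, False if all None, error otherwise
--     """
--     nones = [x is None for x in seq]
--     if any(nones):
--         if all(nones):
--             return False
--         else:
--             raise ValueError("Either 0 or all None allowed")
--     return True
-- ===== SOURCE B (Python) =====
-- def _has_dim(seq):
--     """Check if either 0 or all None are present
--
--     Returns
--     -------
--     True if no None in seq, False if all None, error otherwise
--     """
--     lst = list(seq)
--     if not lst: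
--         return True
--     expect_none = lst[0] is None
--     for x in lst[1:]:
--         if (x is None) != expect_none:
--             raise ValueError("Either 0 or all None allowed")
--     return not expect_none
-- ===== Notes on version B (the rewrite author's own statement) =====
-- stated objective: alternative
-- what changed: Instead of classifying every element and combining with any-then-all, B decides the answer from the FIRST element alone (None => False, value => True) and only verifies that the rest of the sequence is homogeneous with it, raising at the first mismatch.
-- outside the precondition, e.g. on _has_dim([1, None]): A raises ValueError, B raises ValueError
import Mathlib
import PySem

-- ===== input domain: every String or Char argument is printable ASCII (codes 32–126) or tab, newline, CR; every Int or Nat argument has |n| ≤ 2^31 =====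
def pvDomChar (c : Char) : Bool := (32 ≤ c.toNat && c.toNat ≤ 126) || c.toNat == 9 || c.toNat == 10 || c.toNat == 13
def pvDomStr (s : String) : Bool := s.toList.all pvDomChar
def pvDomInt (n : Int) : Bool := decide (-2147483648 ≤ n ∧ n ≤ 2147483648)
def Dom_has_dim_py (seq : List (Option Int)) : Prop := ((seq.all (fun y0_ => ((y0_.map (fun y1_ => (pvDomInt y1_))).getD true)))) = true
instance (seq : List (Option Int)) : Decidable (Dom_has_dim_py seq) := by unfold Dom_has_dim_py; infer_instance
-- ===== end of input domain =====

-- B decides the answer from the first element alone and only checks the tail for homogeneity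
-- with it, instead of A's classify-every-element-then-any-then-all (alternative decomposition).

-- ===== PORT A =====
-- nones = [x is None for x in seq]; any → (if all → False, else raise); else True.
-- The 'raise ValueError' branch is outside Pre_ and ported as an arbitrary value (false).
def has_dim_py (seq : List (Option Int)) : Bool :=
  let nones := seq.map (fun x => x.isNone)
  if nones.any id then
    if nones.all id then false
    else false  -- raise ValueError: excluded by Pre_has_dim_py
  else true

-- ===== PORT B =====
-- empty → True; otherwise expect_none := (first is None), verify the tail matches it
-- (the mismatch case raises ValueError: excluded by Pre_has_dim_py), return not expect_none.
def has_dim_py_alt (seq : List (Option Int)) : Bool :=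
  match seq with
  | [] => true
  | x :: t =>
    let expect_none := x.isNone
    if t.all (fun y => y.isNone == expect_none) then !expect_none
    else !expect_none  -- raise ValueError: excluded by Pre_has_dim_py

-- ===== PRECONDITION & SPEC =====
-- Pre_ excludes exactly the mixed inputs (some None and some non-None), on which both A and B raise ValueError.
def Pre_has_dim_py (seq : List (Option Int)) : Prop :=
  (∀ x ∈ seq, x = none) ∨ (∀ x ∈ seq, x ≠ none)
instance (seq : List (Option Int)) : Decidable (Pre_has_dim_py seq) := by unfold Pre_has_dim_py; infer_instance
def pvWitness_has_dim_py : List (Option Int) := [some 1, some 2]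
def Spec_has_dim_py (seq : List (Option Int)) (out : Bool) : Prop := out = has_dim_py_alt seq
instance (seq : List (Option Int)) (out : Bool) : Decidable (Spec_has_dim_py seq out) := by unfold Spec_has_dim_py; infer_instance

-- ===== CLAIM (what is proved, stated in full; the proofs are below) =====
def Claim_equal_has_dim_py : Prop := ∀ (seq : List (Option Int)), Dom_has_dim_py seq → Pre_has_dim_py seq → Spec_has_dim_py seq (has_dim_py seq)

-- ===== LEMMAS AND PROOFS =====

-- ===== VERDICT (by name: the statement is the Claim_ definition above) =====
theorem has_dim_py_spec : Claim_equal_has_dim_py := by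
  intro seq _ hpre
  unfold Spec_has_dim_py has_dim_py has_dim_py_alt
  cases seq with
  | nil => simp
  | cons x t =>
    rcases hpre with h | h
    · -- all None
      have hx : x = none := h x (by simp)
      have ht : ∀ y ∈ t, y = none := fun y hy => h y (by simp [hy])
      have hall : (List.map (fun x => x.isNone) (x :: t)).all id = true := by
        simp only [List.all_map, List.all_eq_true]
        intro a ha
        rw [List.mem_cons] at ha
        rcases ha with ha | ha
        · simp [ha, hx]
        · simp [ht a ha]
      have hany : (List.map (fun x => x.isNone) (x :: t)).any id = true := by
        simp [hx]
      have htb : t.all (fun y => y.isNone == x.isNone) = true := by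
        simp only [List.all_eq_true]
        intro a ha; simp [ht a ha, hx]
      simp [hany, hall, htb, hx]
    · -- no None
      have hx : x.isNone = false := by
        cases x with
        | none => exact absurd rfl (h none (by simp))
        | some v => rfl
      have ht : ∀ y ∈ t, y.isNone = false := by
        intro y hy
        cases y with
        | none => exact absurd rfl (h none (by simp [hy]))
        | some v => rfl
      have hany : (List.map (fun x => x.isNone) (x :: t)).any id = false := by
        simp only [List.any_map, List.any_eq_false]
        intro a ha
        rw [List.mem_cons] at ha
        rcases ha with ha | ha
        · simp [ha, hx]
        · simp [ht a ha]
      have htb : t.all (fun y => y.isNone == x.isNone) = true := by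
        simp only [List.all_eq_true]
        intro a ha; simp [ht a ha, hx]
      have hnt : none ∉ t := fun hn => absurd rfl (h none (by simp [hn]))
      simp [hany, htb, hx, hnt]
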